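-- pv_equiv track=rewrite | github.com/geethanjalipaul/python | 35.neon num or not.py | check_neon
-- ===== SOURCE A (Python) =====
-- def check_neon(number):
--     temp=number
--     temp=temp**2
--     sum=0
--     while(temp>0):
--         last=temp%10
--         sum=sum+last
--         temp=temp//10
--     if(sum==number):
--         return True
--     else:
--         return False
-- ===== SOURCE B (Python) =====
-- def check_neon(number):
--     total = 0
--     for c in str(number ** 2):
--         total = total + int(c)
--     return total == number
-- ===== Notes on version B (the rewrite author's own statement) =====
-- stated objective: idiomatic
-- what changed: B sums the digits of the square by iterating over its decimal string representation instead of A's repeated divmod-by-10 loop on the integer.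
import Mathlib
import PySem

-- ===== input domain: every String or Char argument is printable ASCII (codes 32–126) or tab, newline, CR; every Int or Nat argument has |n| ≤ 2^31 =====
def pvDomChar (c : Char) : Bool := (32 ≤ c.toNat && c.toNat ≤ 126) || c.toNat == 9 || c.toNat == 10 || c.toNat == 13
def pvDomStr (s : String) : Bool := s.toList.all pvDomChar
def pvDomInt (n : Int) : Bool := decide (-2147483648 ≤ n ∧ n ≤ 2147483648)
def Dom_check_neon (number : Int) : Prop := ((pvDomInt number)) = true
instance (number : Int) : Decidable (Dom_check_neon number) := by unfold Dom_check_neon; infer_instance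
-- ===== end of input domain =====

-- B sums the digits of the square read from its decimal string; A divides repeatedly by 10.

-- ===== PORT A =====
-- the while loop of A: while temp > 0: last = temp % 10; sum += last; temp //= 10
def check_neon_loop (temp sum : Int) : Int :=
  if temp > 0 then
    check_neon_loop (PySem.Int.floordiv temp 10) (sum + PySem.Int.mod temp 10)
  else sum
termination_by temp.toNat
decreasing_by
  simp only [PySem.Int.floordiv]
  rename_i h
  have heq : temp.fdiv 10 = temp / 10 := by rw [Int.fdiv_eq_ediv]; norm_num
  have : temp / 10 < temp := by omega
  omega

def check_neon (number : Int) : Bool :=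
  let temp := number
  let temp := temp ^ 2
  let sum := check_neon_loop temp 0
  if sum = number then true else false

-- ===== PORT B =====
-- int(c) for a decimal digit character c is its digit value; str(number**2) contains only
-- digits since the square is nonnegative, so the port reads each char's value as toNat - 48.
def check_neon_alt (number : Int) : Bool :=
  let total := (PySem.Int.toStr (number ^ 2)).toList.foldl
    (fun s c => s + ((c.toNat : Int) - 48)) 0
  total == number

-- ===== PRECONDITION & SPEC =====
def Spec_check_neon (number : Int) (out : Bool) : Prop := out = check_neon_alt number
instance (number : Int) (out : Bool) : Decidable (Spec_check_neon number out) := by unfold Spec_check_neon; infer_instance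

-- ===== CLAIM (what is proved, stated in full; the proofs are below) =====
def Claim_equal_check_neon : Prop := ∀ (number : Int), Dom_check_neon number → Spec_check_neon number (check_neon number)

-- ===== LEMMAS AND PROOFS =====

-- digit sum used as the common characterisation
def pvDsum (n : Nat) : Int := ((Nat.digits 10 n).sum : Nat)

lemma pvDsum_pos (n : Nat) (h : 0 < n) : pvDsum n = (↑(n % 10) : Int) + pvDsum (n / 10) := by
  unfold pvDsum
  rw [Nat.digits_def' (by norm_num : 1 < 10) h]
  push_cast [List.sum_cons]
  ring

-- A's loop computes sum + digit-sum of temp (for temp ≥ 0)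
lemma check_neon_loop_eq (temp sum : Int) (h : 0 ≤ temp) :
    check_neon_loop temp sum = sum + pvDsum temp.toNat := by
  induction temp, sum using check_neon_loop.induct with
  | case1 temp sum hpos ih =>
    rw [check_neon_loop]
    simp only [hpos, if_pos]
    have hfd : PySem.Int.floordiv temp 10 = temp / 10 := by
      simp only [PySem.Int.floordiv]; rw [Int.fdiv_eq_ediv]; norm_num
    have hmd : PySem.Int.mod temp 10 = temp % 10 := by
      simp only [PySem.Int.mod]; rw [Int.fmod_eq_emod]; norm_num
    rw [hfd, hmd] at ih ⊢
    rw [ih (Int.ediv_nonneg h (by norm_num))]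
    have h1 : (temp / 10).toNat = temp.toNat / 10 := by omega
    have h2 : temp % 10 = ((temp.toNat % 10 : Nat) : Int) := by omega
    rw [h1, h2, pvDsum_pos temp.toNat (by omega)]
    ring
  | case2 temp sum hpos =>
    rw [check_neon_loop]
    simp only [hpos, if_false]
    have : temp.toNat = 0 := by omega
    simp [this, pvDsum]

-- digit character values
lemma pvDigitChar_val (d : Nat) (h : d < 10) :
    ((Nat.digitChar d).toNat : Int) - 48 = (d : Int) := by
  interval_cases d <;> decide

-- foldl over a char list = starting value + sum of values
lemma pvFoldl_val (l : List Char) (a : Int) :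
    l.foldl (fun s c => s + ((c.toNat : Int) - 48)) a
      = a + (l.map (fun c => ((c.toNat : Int) - 48))).sum := by
  induction l generalizing a with
  | nil => simp
  | cons c t ih => simp [List.foldl_cons, ih]; ring

-- the string digits of n sum to pvDsum n
lemma pvToDigitsCore_sum (fuel n : Nat) (ds : List Char) (hfuel : n < fuel) :
    ((Nat.toDigitsCore 10 fuel n ds).map (fun c => ((c.toNat : Int) - 48))).sum
      = pvDsum n + ((ds.map (fun c => ((c.toNat : Int) - 48))).sum) := by
  induction fuel generalizing n ds with
  | zero => omega
  | succ fuel ih =>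
    rw [Nat.toDigitsCore]
    by_cases hz : n / 10 = 0
    · simp only [hz, if_pos]
      rcases Nat.eq_zero_or_pos n with hn | hn
      · subst hn; simp [pvDsum, pvDigitChar_val 0 (by norm_num)]
      · have hlt : n % 10 < 10 := Nat.mod_lt _ (by norm_num)
        rw [List.map_cons, List.sum_cons, pvDigitChar_val _ hlt,
          pvDsum_pos n hn, hz]
        simp [pvDsum]
    · simp only [hz, if_false]
      have hn : 0 < n := by
        rcases Nat.eq_zero_or_pos n with h | h
        · subst h; simp at hz
        · exact h
      have hdec : n / 10 < n := Nat.div_lt_self hn (by norm_num)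
      rw [ih (n / 10) _ (by omega)]
      have hlt : n % 10 < 10 := Nat.mod_lt _ (by norm_num)
      simp [List.map_cons, List.sum_cons, pvDigitChar_val _ hlt, pvDsum_pos n hn]
      ring

lemma pvAlt_sum (n : Int) (h : 0 ≤ n) :
    (PySem.Int.toStr n).toList.foldl (fun s c => s + ((c.toNat : Int) - 48)) 0
      = pvDsum n.toNat := by
  rw [PySem.Int.toList_toStr, pvFoldl_val]
  unfold PySem.Int.toChars
  rw [if_neg (by omega)]
  rw [Nat.toDigits, pvToDigitsCore_sum (n.toNat + 1) n.toNat [] (by omega)]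
  simp

-- ===== VERDICT (by name: the statement is the Claim_ definition above) =====
theorem check_neon_spec : Claim_equal_check_neon := by
  intro number _
  unfold Spec_check_neon
  have hsq : (0:Int) ≤ number ^ 2 := sq_nonneg number
  show (if check_neon_loop (number ^ 2) 0 = number then true else false)
      = (((PySem.Int.toStr (number ^ 2)).toList.foldl
          (fun s c => s + ((c.toNat : Int) - 48)) 0) == number)
  rw [check_neon_loop_eq _ _ hsq, pvAlt_sum _ hsq]
  simp only [zero_add]
  by_cases h : pvDsum (number ^ 2).toNat = number <;> simp [h]
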